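-- pv_equiv track=rewrite | github.com/VihangaFTW/2004_PERSONAL_NOTES | W2/W2_radix_sort.py | radix_sort_words_by_letter
-- ===== SOURCE A (Python) =====
-- def radix_sort_words_by_letter(word_lst):
--     '''
--     This function sorts a given list of lowercase words in alphabetical order using a non-comparison based algorithm called radix sort,
--     which utilizes counting sort.
--     :param word_lst: a list of lowercase words
--     :return: the given list sorted in alphabetical order where shorter words come before longer words
--     #* time complexity: O(N*D)
--     #* space complexity: Total: O(N+B) Aux: O(B) as size of count array depends on base.
--      -N is the length of the word_list
--      -D is the number of characters in the largest word in the list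
--     '''
--
--     if len(word_lst) < 2:
--         return word_lst
--
--     # find longest word in list
--     max_word = max(word_lst, key=len)
--
--     # find the number of characters in this word
--     max_chars = len(max_word)
--
--     # loop thru each char of the words
--     for char in range(max_chars-1, -1, -1):  # O(D) but final is O(N*D)
--         temp_count_array: list = [[] for _ in range(27)]   # index 0 is for the empty string and indices [1..26] for lowercase letters
--
--         # loop thru each char in list and add to the count array according to the word
--         for word in word_lst:  # O(N)
--             if char < len(word):
--                 index = ord(word[char]) - ord('a') + 1
--             else:
--                 # we store this word in index 0
--                 index = 0
--             temp_count_array[index].append(word)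
--
--         # sort the given list according to frequency of each character
--         word_lst = [word for sublist in temp_count_array for word in sublist]
--
--     return word_lst
-- ===== SOURCE B (Python) =====
-- def radix_sort_words_by_letter(word_lst):
--     '''
--     MSD (most-significant-digit-first) re-implementation: recursively partition the words
--     into 27 buckets by the character at the current position (bucket 0 = word exhausted),
--     then concatenate buckets in order, recursing only into buckets that still need sorting.
--     '''
--     if len(word_lst) < 2:
--         return word_lst
--
--     def helper(words, pos):
--         # every word exhausted at this position: nothing left to distinguish
--         if all(pos >= len(w) for w in words):
--             return words
--         buckets = [[] for _ in range(27)]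
--         for w in words:
--             index = ord(w[pos]) - ord('a') + 1 if pos < len(w) else 0
--             buckets[index].append(w)
--         result = []
--         for b in buckets:
--             if len(b) > 1:
--                 b = helper(b, pos + 1)
--             result.extend(b)
--         return result
--
--     return helper(word_lst, 0)
-- ===== Notes on version B (the rewrite author's own statement) =====
-- stated objective: alternative
-- what changed: Replaces the iterative LSD radix sort (one full counting pass over the whole list for every character position, last position first) with a recursive MSD bucket sort that partitions on the first position and only recurses into buckets that still hold more than one word.
import Mathlib
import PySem

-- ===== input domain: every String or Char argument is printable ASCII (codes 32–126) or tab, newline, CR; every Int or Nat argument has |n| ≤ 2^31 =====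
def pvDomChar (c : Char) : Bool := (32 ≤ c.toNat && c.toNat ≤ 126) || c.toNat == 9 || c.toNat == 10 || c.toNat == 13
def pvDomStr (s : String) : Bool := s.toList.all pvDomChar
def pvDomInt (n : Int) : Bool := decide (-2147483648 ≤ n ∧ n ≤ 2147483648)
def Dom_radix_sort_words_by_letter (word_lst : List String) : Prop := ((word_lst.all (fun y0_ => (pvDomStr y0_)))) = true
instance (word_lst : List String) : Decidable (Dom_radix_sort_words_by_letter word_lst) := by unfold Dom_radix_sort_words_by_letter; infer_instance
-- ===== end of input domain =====

-- B re-implements A's LSD (least-significant-position-first) radix sort as a recursive MSD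
-- (most-significant-position-first) bucket sort; equal return values are proved on every input
-- where the Python A returns (Pre_ excludes exactly A's IndexError inputs). Neither version mutates its argument.

-- ===== PORT A =====
-- Python's bucket index `ord(word[char]) - ord('a') + 1` is used to index the 27-element bucket
-- list, so negative indices down to -27 wrap around (Python list indexing); this is modelled by
-- `% 27` (Int.emod), exact for characters with code in [69,122] — exactly what Pre_ admits
-- (outside that range Python raises IndexError and Pre_ excludes the input).
def pvBucketIdx (c : Char) : Nat := (((c.toNat : Int) - 96) % 27).toNat

-- the bucket index of word `w` for the pass at position `p` (0 = word exhausted, A's `else` branch)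
def pvDigit (w : String) (p : Nat) : Nat :=
  if p < w.toList.length then pvBucketIdx (w.toList.getD p ' ') else 0

-- the inner bucket-filling loop, textually identical in A and B
-- (`for word in …: … temp_count_array[index].append(word)`); buckets as a map index → bucket
def pvFillBuckets (ws : List String) (p : Nat) : Nat → List String :=
  ws.foldl (fun bs w => Function.update bs (pvDigit w p) (bs (pvDigit w p) ++ [w])) (fun _ => [])

-- one counting pass: fill the 27 buckets, then `[word for sublist in temp_count_array for word in sublist]`
def pvLsdPass (ws : List String) (p : Nat) : List String :=
  ((List.range 27).map (pvFillBuckets ws p)).flatten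

def radix_sort_words_by_letter (word_lst : List String) : List String :=
  if word_lst.length < 2 then word_lst
  else
    -- max_word = max(word_lst, key=len); the list is nonempty here, so max? is `some`
    let max_word := (PySem.List.max? word_lst (fun w => PySem.Str.len w)).getD ""
    let max_chars := (PySem.Str.len max_word).toNat
    -- for char in range(max_chars-1, -1, -1): one counting pass per position, last position first
    ((List.range max_chars).reverse).foldl pvLsdPass word_lst

-- ===== PORT B =====
-- (these two lemmas are stated before the port because its `decreasing_by` cites them)
def pvMaxLen (ws : List String) : Nat := ws.foldr (fun w m => max w.toList.length m) 0

theorem pvMaxLen_le_of_mem {ws : List String} {w : String} (h : w ∈ ws) :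
    w.toList.length ≤ pvMaxLen ws := by
  induction ws with
  | nil => cases h
  | cons x xs ih =>
    rcases List.mem_cons.mp h with rfl | h'
    · exact le_max_left _ _
    · exact le_trans (ih h') (le_max_right _ _)

theorem pvMaxLen_le_of_subset {l1 l2 : List String} (h : ∀ x ∈ l1, x ∈ l2) :
    pvMaxLen l1 ≤ pvMaxLen l2 := by
  induction l1 with
  | nil => simp [pvMaxLen]
  | cons x xs ih =>
    simp only [pvMaxLen, List.foldr_cons]
    exact max_le (pvMaxLen_le_of_mem (h x List.mem_cons_self))
      (ih (fun y hy => h y (List.mem_cons_of_mem _ hy)))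

theorem pvFillBuckets_eq (ws : List String) (p i : Nat) :
    pvFillBuckets ws p i = ws.filter (fun w => decide (pvDigit w p = i)) := by
  have go : ∀ (ws : List String) (bs : Nat → List String),
      (ws.foldl (fun bs w => Function.update bs (pvDigit w p) (bs (pvDigit w p) ++ [w])) bs) i
        = bs i ++ ws.filter (fun w => decide (pvDigit w p = i)) := by
    intro ws
    induction ws with
    | nil => intro bs; simp
    | cons w ws ih =>
      intro bs
      simp only [List.foldl_cons, List.filter_cons, ih]
      by_cases h : pvDigit w p = i
      · simp [h, Function.update_apply]
      · simp [h, Ne.symm h]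
  simpa using go ws (fun _ => [])

def pvMsdHelper (words : List String) (pos : Nat) : List String :=
  -- if all(pos >= len(w) for w in words): return words
  if h : words.all (fun w => decide (w.toList.length ≤ pos)) then words
  else
    let bs := pvFillBuckets words pos
    -- fill the buckets, recurse into buckets with more than one word, concatenate in order
    ((List.range 27).map (fun i => if 1 < (bs i).length then pvMsdHelper (bs i) (pos + 1) else bs i)).flatten
termination_by pvMaxLen words - pos
decreasing_by
  · have hx : ∃ w ∈ words, pos < w.toList.length := by
      simpa [List.all_eq_true, Nat.not_le] using h
    obtain ⟨w, hw, hlen⟩ := hx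
    have h1 : pos < pvMaxLen words := lt_of_lt_of_le hlen (pvMaxLen_le_of_mem hw)
    have h2 : pvMaxLen (pvFillBuckets words pos i) ≤ pvMaxLen words := by
      apply pvMaxLen_le_of_subset
      intro x hx
      rw [pvFillBuckets_eq] at hx
      exact (List.mem_filter.mp hx).1
    omega

def radix_sort_words_by_letter_alt (word_lst : List String) : List String :=
  if word_lst.length < 2 then word_lst
  else pvMsdHelper word_lst 0

-- ===== PRECONDITION & SPEC =====
-- Pre_ excludes exactly the inputs on which the Python A raises IndexError: a list of two or
-- more words containing a character whose code is outside [69,122] (its bucket index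
-- ord(c)-ord('a')+1 falls outside the wrap-around range [-27,26] of the 27-bucket list).
-- A returns normally on every input Pre_ admits.
def Pre_radix_sort_words_by_letter (word_lst : List String) : Prop :=
  word_lst.length < 2 ∨
    (word_lst.all (fun w => w.toList.all (fun c => 69 ≤ c.toNat && c.toNat ≤ 122))) = true
instance (word_lst : List String) : Decidable (Pre_radix_sort_words_by_letter word_lst) := by
  unfold Pre_radix_sort_words_by_letter; infer_instance

def pvWitness_radix_sort_words_by_letter : List String := ["ba", "ab"]

def Spec_radix_sort_words_by_letter (word_lst : List String) (out : List String) : Prop :=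
  out = radix_sort_words_by_letter_alt word_lst
instance (word_lst : List String) (out : List String) :
    Decidable (Spec_radix_sort_words_by_letter word_lst out) := by
  unfold Spec_radix_sort_words_by_letter; infer_instance

-- ===== CLAIM (what is proved, stated in full; the proofs are below) =====
def Claim_equal_radix_sort_words_by_letter : Prop :=
  ∀ (word_lst : List String), Dom_radix_sort_words_by_letter word_lst →
    Pre_radix_sort_words_by_letter word_lst →
    Spec_radix_sort_words_by_letter word_lst (radix_sort_words_by_letter word_lst)

-- ===== LEMMAS AND PROOFS =====

-- the key of a word: its sequence of bucket indices, padded with bucket 0 to length m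
def pvKey (m : Nat) (w : String) : List Nat := (List.range m).map (pvDigit w)

-- lexicographic ≤ on keys
def pvKeyLe (k1 k2 : List Nat) : Prop := k1 = k2 ∨ List.Lex (· < ·) k1 k2

-- sorted by the key suffixes from position p on
def pvSortedFrom (m p : Nat) (l : List String) : Prop :=
  l.Pairwise (fun a b => pvKeyLe ((pvKey m a).drop p) ((pvKey m b).drop p))

-- same words with the same keys in the same relative order (the stability invariant)
def pvFiltEq (m : Nat) (l1 l2 : List String) : Prop :=
  ∀ k, l1.filter (fun w => decide (pvKey m w = k)) = l2.filter (fun w => decide (pvKey m w = k))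

theorem pvDigit_lt (w : String) (p : Nat) : pvDigit w p < 27 := by
  unfold pvDigit pvBucketIdx
  split
  · have h1 : (0:Int) ≤ (((w.toList.getD p ' ').toNat : Int) - 96) % 27 := Int.emod_nonneg _ (by norm_num)
    have h2 : (((w.toList.getD p ' ').toNat : Int) - 96) % 27 < 27 := Int.emod_lt_of_pos _ (by norm_num)
    omega
  · norm_num

theorem pvKey_length (m : Nat) (w : String) : (pvKey m w).length = m := by simp [pvKey]

theorem pvKey_getElem (m : Nat) (w : String) (p : Nat) (hp : p < m) :
    (pvKey m w)[p]'(by simp [pvKey_length, hp]) = pvDigit w p := by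
  simp [pvKey]

theorem pvKey_drop_cons (m : Nat) (w : String) (p : Nat) (hp : p < m) :
    (pvKey m w).drop p = pvDigit w p :: (pvKey m w).drop (p + 1) := by
  rw [List.drop_eq_getElem_cons (by simp [pvKey_length, hp]), pvKey_getElem m w p hp]

theorem pvKey_digit_of_eq {m : Nat} {w : String} {k : List Nat} (h : pvKey m w = k)
    {p : Nat} (hp : p < m) : pvDigit w p = k.getD p 0 := by
  subst h
  rw [List.getD_eq_getElem _ _ (by simp [pvKey_length, hp])]
  exact (pvKey_getElem m w p hp).symm

theorem pvKey_drop_exhausted (m p : Nat) (w : String) (h : w.toList.length ≤ p) :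
    (pvKey m w).drop p = List.replicate (m - p) 0 := by
  apply List.ext_getElem
  · simp [pvKey_length]
  · intro j h1 h2
    have hj : p + j < m := by simp [pvKey_length] at h1; omega
    rw [List.getElem_drop, List.getElem_replicate]
    have : (pvKey m w)[p + j]'(by simp [pvKey_length]; omega) = pvDigit w (p + j) :=
      pvKey_getElem m w (p + j) hj
    rw [this]
    unfold pvDigit
    rw [if_neg (by omega)]

theorem pvSortedFrom_of_exhausted (m p : Nat) (l : List String)
    (h : ∀ w ∈ l, w.toList.length ≤ p) : pvSortedFrom m p l := by
  induction l with
  | nil => exact List.Pairwise.nil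
  | cons x xs ih =>
    refine List.Pairwise.cons (fun b hb => ?_) (ih (fun w hw => h w (List.mem_cons_of_mem _ hw)))
    left
    rw [pvKey_drop_exhausted m p x (h x List.mem_cons_self),
        pvKey_drop_exhausted m p b (h b (List.mem_cons_of_mem _ hb))]

theorem pvSortedFrom_short (m p : Nat) (l : List String) (h : l.length ≤ 1) :
    pvSortedFrom m p l := by
  match l, h with
  | [], _ => exact List.Pairwise.nil
  | [x], _ => exact List.pairwise_singleton _ _

theorem pvSortedFrom_of_ge (m p : Nat) (l : List String) (h : m ≤ p) :
    pvSortedFrom m p l := by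
  induction l with
  | nil => exact List.Pairwise.nil
  | cons x xs ih =>
    refine List.Pairwise.cons (fun b _ => ?_) ih
    left
    rw [List.drop_eq_nil_of_le (by simp [pvKey_length]; omega),
        List.drop_eq_nil_of_le (by simp [pvKey_length]; omega)]

theorem pvKeyLe_antisymm {k1 k2 : List Nat} (h1 : pvKeyLe k1 k2) (h2 : pvKeyLe k2 k1) :
    k1 = k2 := by
  rcases h1 with h1 | h1
  · exact h1
  · rcases h2 with h2 | h2
    · exact h2.symm
    · exact absurd h2 (Std.Asymm.asymm _ _ h1)

theorem pvFiltEq_mem {m : Nat} {l1 l2 : List String} (h : pvFiltEq m l1 l2) (x : String) :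
    x ∈ l1 ↔ x ∈ l2 := by
  constructor <;> intro hx
  · have : x ∈ l2.filter (fun w => decide (pvKey m w = pvKey m x)) := by
      rw [← h]; exact List.mem_filter.mpr ⟨hx, by simp⟩
    exact (List.mem_filter.mp this).1
  · have : x ∈ l1.filter (fun w => decide (pvKey m w = pvKey m x)) := by
      rw [h]; exact List.mem_filter.mpr ⟨hx, by simp⟩
    exact (List.mem_filter.mp this).1

-- a list sorted by key whose per-key classes are fixed is unique
theorem pvStableUnique (m : Nat) :
    ∀ ys zs : List String,
      ys.Pairwise (fun a b => pvKeyLe (pvKey m a) (pvKey m b)) →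
      zs.Pairwise (fun a b => pvKeyLe (pvKey m a) (pvKey m b)) →
      pvFiltEq m ys zs → ys = zs := by
  intro ys
  induction ys with
  | nil =>
    intro zs _ _ hf
    cases zs with
    | nil => rfl
    | cons z zs' =>
      have := hf (pvKey m z)
      simp at this
  | cons y ys' ih =>
    intro zs hys hzs hf
    cases zs with
    | nil =>
      have := hf (pvKey m y)
      simp at this
    | cons z zs' =>
      have hyz : pvKey m y = pvKey m z := by
        have hz1 : z ∈ y :: ys' := by
          have : z ∈ (y :: ys').filter (fun w => decide (pvKey m w = pvKey m z)) := by
            rw [hf]; exact List.mem_filter.mpr ⟨List.mem_cons_self, by simp⟩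
          exact (List.mem_filter.mp this).1
        have hy1 : y ∈ z :: zs' := by
          have : y ∈ (z :: zs').filter (fun w => decide (pvKey m w = pvKey m y)) := by
            rw [← hf]; exact List.mem_filter.mpr ⟨List.mem_cons_self, by simp⟩
          exact (List.mem_filter.mp this).1
        rcases List.mem_cons.mp hz1 with h | h
        · rw [h]
        · have h1 : pvKeyLe (pvKey m y) (pvKey m z) := (List.pairwise_cons.mp hys).1 z h
          rcases List.mem_cons.mp hy1 with h' | h'
          · rw [h']
          · exact pvKeyLe_antisymm h1 ((List.pairwise_cons.mp hzs).1 y h')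
      have hfy := hf (pvKey m y)
      rw [List.filter_cons_of_pos (by simp), List.filter_cons_of_pos (by simp [hyz])] at hfy
      have hy_eq_z : y = z := (List.cons.injEq _ _ _ _ ▸ hfy).1
      subst hy_eq_z
      have htail : pvFiltEq m ys' zs' := by
        intro k
        by_cases hk : pvKey m y = k
        · have := hf k
          rw [List.filter_cons_of_pos (by simp [hk]), List.filter_cons_of_pos (by simp [hk])] at this
          exact (List.cons.injEq _ _ _ _ ▸ this).2
        · have := hf k
          rwa [List.filter_cons_of_neg (by simp [hk]), List.filter_cons_of_neg (by simp [hk])] at this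
      exact congrArg (y :: ·) (ih zs' (List.pairwise_cons.mp hys).2 (List.pairwise_cons.mp hzs).2 htail)

-- ===== the generic one-position bucket step (shared backbone of one LSD pass and one MSD level) =====

theorem pvBucketStep_sorted (m p : Nat) (G : Nat → List String)
    (hdig : ∀ i, ∀ x ∈ G i, pvDigit x p = i)
    (hsort : ∀ i, pvSortedFrom m (p + 1) (G i))
    (hp : p < m) :
    pvSortedFrom m p (((List.range 27).map G).flatten) := by
  unfold pvSortedFrom
  rw [List.pairwise_flatten]
  constructor
  · intro l hl
    obtain ⟨i, _, rfl⟩ := List.mem_map.mp hl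
    refine (hsort i).imp_of_mem ?_
    intro a b ha hb hab
    rw [pvKey_drop_cons m a p hp, pvKey_drop_cons m b p hp, hdig i a ha, hdig i b hb]
    rcases hab with h | h
    · exact Or.inl (by rw [h])
    · exact Or.inr (List.Lex.cons h)
  · rw [List.pairwise_map]
    refine List.pairwise_lt_range.imp_of_mem ?_
    intro i j _ _ hij x hx y hy
    rw [pvKey_drop_cons m x p hp, pvKey_drop_cons m y p hp, hdig i x hx, hdig j y hy]
    exact Or.inr (List.Lex.rel hij)

theorem pvFlattenSingle {α : Type} (n d : Nat) (F : List α) (hd : d < n) :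
    (((List.range n).map (fun i => if i = d then F else [])).flatten) = F := by
  induction n with
  | zero => omega
  | succ n ih =>
    rw [List.range_succ, List.map_append, List.flatten_append]
    by_cases h : d = n
    · subst h
      have : ((List.range d).map (fun i => if i = d then F else [])).flatten = [] := by
        rw [List.flatten_eq_nil_iff]
        intro l hl
        obtain ⟨i, hi, rfl⟩ := List.mem_map.mp hl
        rw [if_neg (by have := List.mem_range.mp hi; omega)]
      simp [this]
    · have hdn : d < n := by omega
      rw [ih hdn]
      simp only [List.map_cons, List.map_nil, List.flatten_cons, List.flatten_nil,
        if_neg (fun hh : n = d => h hh.symm), List.append_nil]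

theorem pvBucketStep_filters (m p : Nat) (ws : List String) (G : Nat → List String)
    (hfilt : ∀ i, pvFiltEq m (G i) (ws.filter (fun w => decide (pvDigit w p = i))))
    (hp : p < m) :
    pvFiltEq m (((List.range 27).map G).flatten) ws := by
  intro k
  rw [List.filter_flatten, List.map_map]
  have hGi : ∀ i, (G i).filter (fun w => decide (pvKey m w = k))
      = if i = k.getD p 0 then ws.filter (fun w => decide (pvKey m w = k)) else [] := by
    intro i
    rw [hfilt i k, List.filter_filter]
    by_cases hi : i = k.getD p 0
    · subst hi
      rw [if_pos rfl]
      apply List.filter_congr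
      intro w _
      by_cases hk : pvKey m w = k
      · simp [hk, pvKey_digit_of_eq hk hp]
      · simp [hk]
    · rw [if_neg hi]
      rw [List.filter_eq_nil_iff]
      intro w _
      simp only [Bool.and_eq_true, decide_eq_true_eq, not_and]
      intro hk hd
      exact hi (by rw [← hd, pvKey_digit_of_eq hk hp])
  have hmap : (List.range 27).map ((fun l => l.filter (fun w => decide (pvKey m w = k))) ∘ G)
      = (List.range 27).map (fun i => if i = k.getD p 0 then ws.filter (fun w => decide (pvKey m w = k)) else []) := by
    apply List.map_congr_left
    intro i _
    exact hGi i
  rw [hmap]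
  by_cases hd : k.getD p 0 < 27
  · exact pvFlattenSingle 27 _ _ hd
  · have h1 : ws.filter (fun w => decide (pvKey m w = k)) = [] := by
      rw [List.filter_eq_nil_iff]
      intro w _
      simp only [decide_eq_true_eq]
      intro hk
      exact hd (pvKey_digit_of_eq hk hp ▸ pvDigit_lt w p)
    rw [h1]
    rw [List.flatten_eq_nil_iff]
    intro l hl
    obtain ⟨i, _, rfl⟩ := List.mem_map.mp hl
    split <;> rfl

-- ===== the LSD side =====

theorem pvLsdPass_eq (ws : List String) (p : Nat) :
    pvLsdPass ws p = ((List.range 27).map (fun i => ws.filter (fun w => decide (pvDigit w p = i)))).flatten := by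
  unfold pvLsdPass
  congr 1
  apply List.map_congr_left
  intro i _
  exact pvFillBuckets_eq ws p i

theorem pvLsdPass_sorted (m p : Nat) (ws : List String) (hp : p < m)
    (h : pvSortedFrom m (p + 1) ws) : pvSortedFrom m p (pvLsdPass ws p) := by
  rw [pvLsdPass_eq]
  apply pvBucketStep_sorted m p _ _ _ hp
  · intro i x hx
    simpa using (List.mem_filter.mp hx).2
  · intro i
    exact List.Pairwise.sublist List.filter_sublist h

theorem pvLsdPass_filters (m p : Nat) (ws : List String) (hp : p < m) :
    pvFiltEq m (pvLsdPass ws p) ws := by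
  rw [pvLsdPass_eq]
  apply pvBucketStep_filters m p ws _ _ hp
  intro i k; rfl

theorem pvFiltEq_trans {m : Nat} {l1 l2 l3 : List String}
    (h1 : pvFiltEq m l1 l2) (h2 : pvFiltEq m l2 l3) : pvFiltEq m l1 l3 :=
  fun k => (h1 k).trans (h2 k)

theorem pvLsdLoop (m : Nat) (ws : List String) :
    ∀ n c, c ≤ m → m - c = n →
      pvSortedFrom m c (((List.range' c (m - c)).reverse).foldl pvLsdPass ws) ∧
      pvFiltEq m (((List.range' c (m - c)).reverse).foldl pvLsdPass ws) ws := by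
  intro n
  induction n with
  | zero =>
    intro c hc hn
    have : m - c = 0 := hn
    rw [this]
    simp only [List.range'_zero, List.reverse_nil, List.foldl_nil]
    exact ⟨pvSortedFrom_of_ge m c ws (by omega), fun k => rfl⟩
  | succ n ih =>
    intro c hc hn
    have hcm : c < m := by omega
    have h1 : m - c = (m - (c + 1)) + 1 := by omega
    rw [h1, List.range'_succ, List.reverse_cons, List.foldl_append]
    simp only [List.foldl_cons, List.foldl_nil]
    have h2 : m - (c + 1) = n := by omega
    obtain ⟨hs, hfe⟩ := ih (c + 1) (by omega) h2
    refine ⟨pvLsdPass_sorted m c _ hcm hs, pvFiltEq_trans (pvLsdPass_filters m c _ hcm) hfe⟩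

-- ===== the MSD side =====

theorem pvMsdSpec (m : Nat) :
    ∀ n (ws : List String) (p : Nat), m - p = n → (∀ w ∈ ws, w.toList.length ≤ m) →
      pvSortedFrom m p (pvMsdHelper ws p) ∧ pvFiltEq m (pvMsdHelper ws p) ws := by
  intro n
  induction n with
  | zero =>
    intro ws p hn hb
    have hg : ws.all (fun w => decide (w.toList.length ≤ p)) := by
      simp only [List.all_eq_true, decide_eq_true_eq]
      intro w hw; have := hb w hw; omega
    rw [pvMsdHelper, dif_pos hg]
    exact ⟨pvSortedFrom_of_exhausted m p ws (by simpa using hg), fun k => rfl⟩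
  | succ n ih =>
    intro ws p hn hb
    by_cases hg : ws.all (fun w => decide (w.toList.length ≤ p))
    · rw [pvMsdHelper, dif_pos hg]
      exact ⟨pvSortedFrom_of_exhausted m p ws (by simpa using hg), fun k => rfl⟩
    · rw [pvMsdHelper, dif_neg hg]
      have hp : p < m := by
        obtain ⟨w, hw, hlen⟩ : ∃ w ∈ ws, p < w.toList.length := by
          simpa [List.all_eq_true, Nat.not_le] using hg
        have := hb w hw; omega
      have hsub : ∀ i, ∀ x ∈ pvFillBuckets ws p i, x ∈ ws := by
        intro i x hx
        rw [pvFillBuckets_eq] at hx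
        exact (List.mem_filter.mp hx).1
      have hIH : ∀ i, 1 < (pvFillBuckets ws p i).length →
          pvSortedFrom m (p + 1) (pvMsdHelper (pvFillBuckets ws p i) (p + 1)) ∧
          pvFiltEq m (pvMsdHelper (pvFillBuckets ws p i) (p + 1)) (pvFillBuckets ws p i) :=
        fun i _ => ih (pvFillBuckets ws p i) (p + 1) (by omega)
          (fun w hw => hb w (hsub i w hw))
      have hdig : ∀ i, ∀ x ∈ (fun i => if 1 < (pvFillBuckets ws p i).length
            then pvMsdHelper (pvFillBuckets ws p i) (p + 1) else pvFillBuckets ws p i) i,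
          pvDigit x p = i := by
        intro i x hx
        simp only at hx
        have hx' : x ∈ pvFillBuckets ws p i := by
          split at hx
          · exact (pvFiltEq_mem (hIH i (by assumption)).2 x).mp hx
          · exact hx
        rw [pvFillBuckets_eq] at hx'
        simpa using (List.mem_filter.mp hx').2
      constructor
      · show pvSortedFrom m p (((List.range 27).map (fun i =>
          if 1 < (pvFillBuckets ws p i).length
          then pvMsdHelper (pvFillBuckets ws p i) (p + 1) else pvFillBuckets ws p i)).flatten)
        apply pvBucketStep_sorted m p _ hdig ?_ hp
        intro i
        split
        · exact (hIH i (by assumption)).1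
        · rw [pvFillBuckets_eq]
          apply pvSortedFrom_short
          rw [← pvFillBuckets_eq ws p i]
          omega
      · show pvFiltEq m (((List.range 27).map (fun i =>
          if 1 < (pvFillBuckets ws p i).length
          then pvMsdHelper (pvFillBuckets ws p i) (p + 1) else pvFillBuckets ws p i)).flatten) ws
        apply pvBucketStep_filters m p ws _ ?_ hp
        intro i
        split
        · exact (pvFillBuckets_eq ws p i) ▸ (hIH i (by assumption)).2
        · rw [pvFillBuckets_eq]
          intro k; rfl

-- sortedFrom m 0 is sortedness by the full keys
theorem pvSortedFrom_zero (m : Nat) (l : List String) (h : pvSortedFrom m 0 l) :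
    l.Pairwise (fun a b => pvKeyLe (pvKey m a) (pvKey m b)) := by
  unfold pvSortedFrom at h
  simpa using h

-- ===== VERDICT (by name: the statement is the Claim_ definition above) =====
theorem radix_sort_words_by_letter_spec : Claim_equal_radix_sort_words_by_letter := by
  intro word_lst _ _
  unfold Spec_radix_sort_words_by_letter
  unfold radix_sort_words_by_letter radix_sort_words_by_letter_alt
  by_cases hlen : word_lst.length < 2
  · rw [if_pos hlen, if_pos hlen]
  · rw [if_neg hlen, if_neg hlen]
    -- the list is nonempty, so max? is some and max_chars bounds every word's length
    obtain ⟨mw, hmw⟩ : ∃ mw, PySem.List.max? word_lst (fun w => PySem.Str.len w) = some mw := by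
      cases h : PySem.List.max? word_lst (fun w => PySem.Str.len w) with
      | none =>
        rw [PySem.List.max?_eq_none_iff] at h
        subst h; simp at hlen
      | some mw => exact ⟨mw, rfl⟩
    set m := (PySem.Str.len ((PySem.List.max? word_lst (fun w => PySem.Str.len w)).getD "")).toNat with hm
    have hbound : ∀ w ∈ word_lst, w.toList.length ≤ m := by
      intro w hw
      have := PySem.List.max?_isMax hmw w hw
      rw [PySem.Str.len_eq, PySem.Str.len_eq] at this
      rw [hm, hmw]
      simp only [Option.getD_some]
      rw [PySem.Str.len_eq]
      omega
    have hA := pvLsdLoop m word_lst (m - 0) 0 (by omega) rfl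
    have hB := pvMsdSpec m (m - 0) word_lst 0 rfl hbound
    rw [Nat.sub_zero, ← List.range_eq_range'] at hA
    exact pvStableUnique m _ _ (pvSortedFrom_zero m _ hA.1) (pvSortedFrom_zero m _ hB.1)
      (pvFiltEq_trans hA.2 (by intro k; exact (hB.2 k).symm))
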